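-- pv_equiv track=rewrite | github.com/NickMusk/tener-ai-v1 | src/tener_interview/question_generation.py | _is_noise_sentence
-- ===== SOURCE A (Python) =====
-- def _is_noise_sentence(text: str) -> bool:
--     low = str(text or "").strip().lower()
--     if not low:
--         return True
--     noise_markers = (
--         "about tener",
--         "tener.ai is building",
--         "our goal is",
--         "we are looking for",
--         "why join",
--         "work with experienced founders",
--         "opportunity to grow",
--         "build a product redefining",
--     )
--     return any(marker in low for marker in noise_markers)
-- ===== SOURCE B (Python) =====
-- _NOISE_MARKERS = (
--     "about tener",
--     "tener.ai is building",
--     "our goal is",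
--     "we are looking for",
--     "why join",
--     "work with experienced founders",
--     "opportunity to grow",
--     "build a product redefining",
-- )
--
--
-- def _is_noise_sentence(text: str) -> bool:
--     low = str(text or "").strip().lower()
--     if not low:
--         return True
--     # single left-to-right scan: at each position, does some marker start here?
--     for i in range(len(low)):
--         for marker in _NOISE_MARKERS:
--             if low.startswith(marker, i):
--                 return True
--     return False
-- ===== Notes on version B (the rewrite author's own statement) =====
-- stated objective: alternative
-- what changed: Replaces eight independent whole-string substring-membership tests with one left-to-right scan over the normalized text that checks at each position whether any marker starts there.
import Mathlib
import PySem

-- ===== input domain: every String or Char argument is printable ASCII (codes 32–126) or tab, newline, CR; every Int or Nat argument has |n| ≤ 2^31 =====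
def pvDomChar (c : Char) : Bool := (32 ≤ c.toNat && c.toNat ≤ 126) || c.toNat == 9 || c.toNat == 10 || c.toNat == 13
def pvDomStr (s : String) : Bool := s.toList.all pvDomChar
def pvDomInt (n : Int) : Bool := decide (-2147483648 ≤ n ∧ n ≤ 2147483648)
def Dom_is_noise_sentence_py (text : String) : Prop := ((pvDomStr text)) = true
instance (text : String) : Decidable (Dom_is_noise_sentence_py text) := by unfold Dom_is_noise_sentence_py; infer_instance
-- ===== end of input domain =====

-- B replaces eight independent `marker in low` substring searches by ONE left-to-right scan
-- that at each position checks whether some marker starts there (objective: alternative).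

-- ===== PORT A =====
-- the tuple of noise markers from A
def pvMarkers : List String :=
  ["about tener", "tener.ai is building", "our goal is", "we are looking for",
   "why join", "work with experienced founders", "opportunity to grow",
   "build a product redefining"]

-- `str(text or "")` is `text` itself for a str argument; then .strip().lower().
def is_noise_sentence_py (text : String) : Bool :=
  let low := PySem.Str.lower (PySem.Str.strip text)
  if low = "" then true
  else pvMarkers.any (fun marker => PySem.Str.isIn marker low)

-- ===== PORT B =====
-- B's markers, on the character-list side (B scans character positions)
def pvMarkersB : List (List Char) := pvMarkers.map String.toList

-- B's outer loop: `for i in range(len(low)): for m in _NOISE_MARKERS: if low.startswith(m, i): return True`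
def pvScan (cs : List Char) : Bool :=
  match cs with
  | [] => false
  | _ :: t => pvMarkersB.any (fun m => PySem.Chars.startswith cs m) || pvScan t

def is_noise_sentence_py_alt (text : String) : Bool :=
  let low := PySem.Chars.lower (PySem.Chars.strip text.toList)
  if low = [] then true else pvScan low

-- ===== PRECONDITION & SPEC =====
def Spec_is_noise_sentence_py (text : String) (out : Bool) : Prop := out = is_noise_sentence_py_alt text
instance (text : String) (out : Bool) : Decidable (Spec_is_noise_sentence_py text out) := by unfold Spec_is_noise_sentence_py; infer_instance

-- ===== CLAIM (what is proved, stated in full; the proofs are below) =====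
def Claim_equal_is_noise_sentence_py : Prop := ∀ (text : String), Dom_is_noise_sentence_py text → Spec_is_noise_sentence_py text (is_noise_sentence_py text)

-- ===== LEMMAS AND PROOFS =====
-- B's scan finds a marker iff that marker is an infix (i.e. a prefix of some suffix)
theorem pvScan_iff (cs : List Char) :
    pvScan cs = true ↔ ∃ m ∈ pvMarkersB, ∃ j, m <+: cs.drop j := by
  induction cs with
  | nil =>
    simp only [pvScan, List.drop_nil, Bool.false_eq_true, false_iff]
    rintro ⟨m, hm, j, hp⟩
    have : m = [] := List.prefix_nil.mp hp
    subst this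
    revert hm; decide
  | cons c t ih =>
    simp only [pvScan, Bool.or_eq_true, List.any_eq_true, PySem.Chars.startswith_iff, ih]
    constructor
    · rintro (⟨m, hm, hp⟩ | ⟨m, hm, j, hp⟩)
      · exact ⟨m, hm, 0, by simpa using hp⟩
      · exact ⟨m, hm, j + 1, by simpa using hp⟩
    · rintro ⟨m, hm, j, hp⟩
      cases j with
      | zero => exact Or.inl ⟨m, hm, by simpa using hp⟩
      | succ j => exact Or.inr ⟨m, hm, j, by simpa using hp⟩

-- ===== VERDICT (by name: the statement is the Claim_ definition above) =====
theorem is_noise_sentence_py_spec : Claim_equal_is_noise_sentence_py := by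
  unfold Claim_equal_is_noise_sentence_py Spec_is_noise_sentence_py
  intro text _
  unfold is_noise_sentence_py is_noise_sentence_py_alt
  have hts : (PySem.Str.lower (PySem.Str.strip text)).toList
      = PySem.Chars.lower (PySem.Chars.strip text.toList) := by
    simp [pysem]
  have hemp : (PySem.Str.lower (PySem.Str.strip text) = "")
      ↔ (PySem.Chars.lower (PySem.Chars.strip text.toList) = []) := by
    rw [← hts]; exact String.toList_eq_nil_iff.symm
  by_cases h : PySem.Str.lower (PySem.Str.strip text) = ""
  · simp [h, hemp.mp h]
  · simp only [if_neg h, if_neg (fun hx => h (hemp.mpr hx))]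
    rw [Bool.eq_iff_iff, pvScan_iff, ← hts]
    simp only [List.any_eq_true, PySem.Str.isIn_iff_infix, pvMarkersB, List.mem_map]
    constructor
    · rintro ⟨m, hm, hinf⟩
      rcases (PySem.Chars.exists_prefix_drop_iff_isIn m.toList _).mpr
          ((PySem.Chars.isIn_iff_infix _ _).mpr hinf) with ⟨j, hp⟩
      exact ⟨m.toList, ⟨m, hm, rfl⟩, j, hp⟩
    · rintro ⟨mc, ⟨m, hm, rfl⟩, j, hp⟩
      exact ⟨m, hm, (PySem.Chars.isIn_iff_infix _ _).mp
        ((PySem.Chars.exists_prefix_drop_iff_isIn _ _).mp ⟨j, hp⟩)⟩
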